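-- pv_equiv track=rewrite | github.com/douymLab/PhyloSOLID | src/scaffold_builder.py | select_overlapping_with_minimum
-- ===== SOURCE A (Python) =====
-- def select_overlapping_with_minimum(results):
--     """
--     选择所有与最小罚分候选重叠的位置
--     """
--     if not results:
--         return []
--
--     # 找到最小penalty_min
--     min_penalty = min(r['penalty_min'] for r in results)
--
--     # 找到所有penalty_min等于最小值的候选
--     min_candidates = [r for r in results if r['penalty_min'] == min_penalty]
--
--     # 计算这些最小候选的最大penalty_max
--     min_group_max = max(r['penalty_max'] for r in min_candidates)
--
--     # 选择所有与最小候选组重叠的位置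
--     selected = []
--     for result in results:
--         # 如果候选的penalty_min <= 最小候选组的最大penalty_max，则选中
--         if result['penalty_min'] <= min_group_max:
--             selected.append(result['position'])
--
--     return selected
-- ===== SOURCE B (Python) =====
-- def select_overlapping_with_minimum(results):
--     # Single stateful pass: track running minimum penalty_min and, tied to it,
--     # the max penalty_max among entries at that minimum; then one selection pass.
--     mp = None
--     mg = None
--     for r in results:
--         p = r['penalty_min']
--         if mp is None or p < mp:
--             mp = p
--             mg = r['penalty_max']
--         elif p == mp:
--             m = r['penalty_max']
--             if m > mg:
--                 mg = m
--     if mg is None: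
--         return []
--     return [r['position'] for r in results if r['penalty_min'] <= mg]
-- ===== Notes on version B (the rewrite author's own statement) =====
-- stated objective: alternative
-- what changed: Replaces A's three separate passes (min over penalty_min, filter of minimal candidates, max over their penalty_max) by one stateful fold that maintains the running minimum and the max penalty_max tied to it, followed by a single filter/map selection pass.
import Mathlib
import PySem

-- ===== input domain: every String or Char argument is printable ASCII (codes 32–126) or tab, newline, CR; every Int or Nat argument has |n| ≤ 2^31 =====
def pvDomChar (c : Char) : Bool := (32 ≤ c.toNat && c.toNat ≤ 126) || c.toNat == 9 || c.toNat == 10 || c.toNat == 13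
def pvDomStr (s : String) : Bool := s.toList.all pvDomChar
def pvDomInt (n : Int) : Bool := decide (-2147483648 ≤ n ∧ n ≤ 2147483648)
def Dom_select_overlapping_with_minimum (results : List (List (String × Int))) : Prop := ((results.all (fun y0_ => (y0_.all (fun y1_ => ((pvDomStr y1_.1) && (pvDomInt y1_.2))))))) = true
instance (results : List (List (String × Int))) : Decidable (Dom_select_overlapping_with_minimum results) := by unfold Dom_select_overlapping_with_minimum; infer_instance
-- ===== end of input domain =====

-- B replaces A's three aggregation passes by one stateful fold (running min +
-- tied max) followed by a single filter/map selection pass; return value only.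

-- shared helper: r[k] for the input dicts (first match; total form used under Pre_)
def pvLookup (r : List (String × Int)) (k : String) : Int :=
  ((PySem.Dict.mk r).get? k).getD 0

-- ===== PORT A =====
def select_overlapping_with_minimum (results : List (List (String × Int))) : List Int :=
  if results = [] then []
  else
    let min_penalty := (PySem.List.min? (results.map (fun r => pvLookup r "penalty_min")) (fun y => y)).getD 0
    let min_candidates := results.filter (fun r => pvLookup r "penalty_min" == min_penalty)
    let min_group_max := (PySem.List.max? (min_candidates.map (fun r => pvLookup r "penalty_max")) (fun y => y)).getD 0
    results.foldl (fun acc r => if pvLookup r "penalty_min" ≤ min_group_max then acc ++ [pvLookup r "position"] else acc) []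

-- ===== PORT B =====
def pvStep (st : Option (Int × Int)) (r : List (String × Int)) : Option (Int × Int) :=
  let p := pvLookup r "penalty_min"
  match st with
  | none => some (p, pvLookup r "penalty_max")
  | some (mp, mg) =>
      if p < mp then some (p, pvLookup r "penalty_max")
      else if p = mp then
        let m := pvLookup r "penalty_max"
        if m > mg then some (mp, m) else some (mp, mg)
      else some (mp, mg)

def select_overlapping_with_minimum_alt (results : List (List (String × Int))) : List Int :=
  match results.foldl pvStep none with
  | none => []
  | some (_, mg) =>
      (results.filter (fun r => pvLookup r "penalty_min" ≤ mg)).map (fun r => pvLookup r "position")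

-- ===== PRECONDITION & SPEC =====
-- Pre_ excludes inputs where some entry lacks one of the keys 'penalty_min',
-- 'penalty_max', 'position': Python A raises KeyError on most of them, and the
-- natural domain is records carrying all three fields (B raises on some inputs
-- with a missing field on an irrelevant entry where A happens to return).
def Pre_select_overlapping_with_minimum (results : List (List (String × Int))) : Prop :=
  ∀ r ∈ results, (r.any (fun p => p.1 == "penalty_min")) = true ∧
                 (r.any (fun p => p.1 == "penalty_max")) = true ∧
                 (r.any (fun p => p.1 == "position")) = true
instance (results : List (List (String × Int))) : Decidable (Pre_select_overlapping_with_minimum results) := by unfold Pre_select_overlapping_with_minimum; infer_instance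

def pvWitness_select_overlapping_with_minimum : (List (List (String × Int))) :=
  [[("penalty_min", 0), ("penalty_max", 1), ("position", 3)],
   [("penalty_min", 2), ("penalty_max", 5), ("position", 4)]]

def Spec_select_overlapping_with_minimum (results : List (List (String × Int))) (out : List Int) : Prop := out = select_overlapping_with_minimum_alt results
instance (results : List (List (String × Int))) (out : List Int) : Decidable (Spec_select_overlapping_with_minimum results out) := by unfold Spec_select_overlapping_with_minimum; infer_instance

-- ===== CLAIM (what is proved, stated in full; the proofs are below) =====
def Claim_equal_select_overlapping_with_minimum : Prop := ∀ (results : List (List (String × Int))), Dom_select_overlapping_with_minimum results → Pre_select_overlapping_with_minimum results → Spec_select_overlapping_with_minimum results (select_overlapping_with_minimum results)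

-- ===== LEMMAS AND PROOFS =====

-- proof-only recursive spec of B's fold, on the (penalty_min, penalty_max) pairs
def pvScan : List (Int × Int) → Int × Int → Int × Int
  | [], st => st
  | q :: t, (mp, mg) =>
      if q.1 < mp then pvScan t (q.1, q.2)
      else if q.1 = mp then (if q.2 > mg then pvScan t (mp, q.2) else pvScan t (mp, mg))
      else pvScan t (mp, mg)

theorem foldl_pvStep_eq_pvScan (l : List (List (String × Int))) (mp mg : Int) :
    l.foldl pvStep (some (mp, mg)) =
      some (pvScan (l.map (fun r => (pvLookup r "penalty_min", pvLookup r "penalty_max"))) (mp, mg)) := by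
  induction l generalizing mp mg with
  | nil => simp [pvScan]
  | cons r t ih =>
      simp only [List.foldl_cons, List.map_cons, pvStep, pvScan]
      split_ifs <;> simp [ih]

theorem foldl_min_le_seed (t : List Int) (a : Int) : t.foldl min a ≤ a := by
  induction t generalizing a with
  | nil => simp
  | cons x t ih => exact le_trans (ih (min a x)) (min_le_left a x)

def pvMaxOf : List Int → Int
  | [] => 0
  | x :: xs => xs.foldl max x

theorem pvScan_snd (t : List (Int × Int)) (mp mg : Int) :
    (pvScan t (mp, mg)).2 =
      (if mp = (t.map (·.1)).foldl min mp then
        ((t.filter (fun q => q.1 == (t.map (·.1)).foldl min mp)).map (·.2)).foldl max mg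
      else
        pvMaxOf ((t.filter (fun q => q.1 == (t.map (·.1)).foldl min mp)).map (·.2))) := by
  induction t generalizing mp mg with
  | nil => simp [pvScan]
  | cons q t ih =>
      have hseed := foldl_min_le_seed (t.map (·.1))
      simp only [pvScan, List.map_cons, List.foldl_cons]
      rcases lt_trichotomy q.1 mp with h1 | h2 | h4
      · -- q.1 < mp : restart with seed (q.1, q.2)
        rw [if_pos h1, min_eq_right h1.le, ih q.1 q.2,
            if_neg (show ¬ mp = (t.map (·.1)).foldl min q.1 by have := hseed q.1; omega)]
        by_cases hq : q.1 = (t.map (·.1)).foldl min q.1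
        · rw [if_pos hq, List.filter_cons_of_pos (by simpa [beq_iff_eq] using hq),
              List.map_cons]
          rfl
        · rw [if_neg hq, List.filter_cons_of_neg (by simpa [beq_iff_eq] using hq)]
      · -- q.1 = mp
        rw [if_neg (by omega), if_pos h2, min_eq_left h2.ge]
        by_cases h3 : q.2 > mg
        · rw [if_pos h3, ih mp q.2]
          by_cases hpM : mp = (t.map (·.1)).foldl min mp
          · rw [if_pos hpM, if_pos hpM,
                List.filter_cons_of_pos (by simp only [beq_iff_eq]; omega),
                List.map_cons, List.foldl_cons, max_eq_right h3.le]
          · rw [if_neg hpM, if_neg hpM,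
                List.filter_cons_of_neg (by simp only [beq_iff_eq]; have := hseed mp; omega)]
        · rw [if_neg h3, ih mp mg]
          by_cases hpM : mp = (t.map (·.1)).foldl min mp
          · rw [if_pos hpM, if_pos hpM,
                List.filter_cons_of_pos (by simp only [beq_iff_eq]; omega),
                List.map_cons, List.foldl_cons, max_eq_left (by omega)]
          · rw [if_neg hpM, if_neg hpM,
                List.filter_cons_of_neg (by simp only [beq_iff_eq]; have := hseed mp; omega)]
      · -- q.1 > mp : drop q
        rw [if_neg (by omega), if_neg (by omega), min_eq_left h4.le, ih mp mg,
            List.filter_cons_of_neg (by simp only [beq_iff_eq]; have := hseed mp; omega)]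

theorem pvMax?_getD (l : List Int) :
    (PySem.List.max? l (fun y => y)).getD 0 = pvMaxOf l := by
  cases l with
  | nil => rfl
  | cons x xs => rw [PySem.List.max?_id_cons]; rfl

theorem select_overlapping_with_minimum_spec : Claim_equal_select_overlapping_with_minimum := by
  unfold Claim_equal_select_overlapping_with_minimum
  intro results _ _
  unfold Spec_select_overlapping_with_minimum
  cases results with
  | nil => rfl
  | cons r rs =>
    have hB : (r :: rs).foldl pvStep none =
        some ((pvScan (rs.map (fun x => (pvLookup x "penalty_min", pvLookup x "penalty_max")))
                 (pvLookup r "penalty_min", pvLookup r "penalty_max")).1,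
              (pvScan (rs.map (fun x => (pvLookup x "penalty_min", pvLookup x "penalty_max")))
                 (pvLookup r "penalty_min", pvLookup r "penalty_max")).2) := by
      rw [List.foldl_cons]
      show rs.foldl pvStep (some (pvLookup r "penalty_min", pvLookup r "penalty_max")) = _
      rw [foldl_pvStep_eq_pvScan]
    have hG : ∀ M : Int,
        (PySem.List.max? (((r :: rs).filter (fun x => pvLookup x "penalty_min" == M)).map
            (fun x => pvLookup x "penalty_max")) (fun y => y)).getD 0
        = (if pvLookup r "penalty_min" = M then
             ((rs.filter (fun x => pvLookup x "penalty_min" == M)).map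
               (fun x => pvLookup x "penalty_max")).foldl max (pvLookup r "penalty_max")
           else
             pvMaxOf ((rs.filter (fun x => pvLookup x "penalty_min" == M)).map
               (fun x => pvLookup x "penalty_max"))) := by
      intro M
      by_cases hq : pvLookup r "penalty_min" = M
      · rw [List.filter_cons_of_pos (by simpa [beq_iff_eq] using hq), List.map_cons,
            PySem.List.max?_id_cons, Option.getD_some, if_pos hq]
      · rw [List.filter_cons_of_neg (by simpa [beq_iff_eq] using hq), if_neg hq, pvMax?_getD]
    simp only [select_overlapping_with_minimum, select_overlapping_with_minimum_alt,
               if_neg (List.cons_ne_nil r rs), hB, List.map_cons,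
               PySem.List.min?_id_cons, Option.getD_some]
    simp only [pvScan_snd, List.map_map, List.filter_map, Function.comp_def,
               PySem.List.foldl_append_ite, List.nil_append]
    simp only [hG]
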